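-- pv_equiv track=rewrite | github.com/Sushant-Sudan-12/Python-Mini-Projects | Beautiful Soup/test.py | minimize_penalty
-- ===== SOURCE A (Python) =====
-- import math
--
-- def is_prime(num):
--     if num <= 1:
--         return False
--     if num == 2:
--         return True
--     if num % 2 == 0:
--         return False
--     for i in range(3, int(math.sqrt(num)) + 1, 2):
--         if num % i == 0:
--             return False
--     return True
--
-- def minimize_penalty(arr):
--     primes = []
--     non_primes = []
--
--     # Separate primes and non-primes
--     for num in arr:
--         if is_prime(num):
--             primes.append(num)
--         else:
--             non_primes.append(num)
--
--     # Calculate penalty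
--     if len(primes) > len(non_primes):
--         penalty = sum(sorted(primes)[:len(primes) - len(non_primes)])
--     else:
--         penalty = sum(sorted(non_primes)[:len(non_primes) - len(primes)])
--
--     return penalty
-- ===== SOURCE B (Python) =====
-- def is_prime(num):
--     # sqrt-free trial division: single while loop over all d with d*d <= num,
--     # no parity special-casing and no math.sqrt call
--     if num < 2:
--         return False
--     d = 2
--     while d * d <= num:
--         if num % d == 0:
--             return False
--         d += 1
--     return True
--
-- def minimize_penalty(arr):
--     # count primes once; the larger group and the surplus k follow from the count alone;
--     # then a single early-terminating scan over the sorted array sums the k smallest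
--     # elements of the larger group -- no partition lists are ever built
--     k0 = 2 * sum(1 for x in arr if is_prime(x)) - len(arr)
--     want = k0 > 0
--     k = abs(k0)
--     total = 0
--     for x in sorted(arr):
--         if k == 0:
--             break
--         if is_prime(x) == want:
--             total += x
--             k -= 1
--     return total
-- ===== Notes on version B (the rewrite author's own statement) =====
-- stated objective: alternative
-- what changed: B replaces A's partition-into-two-lists-then-sort-one-group by a count-and-scan: it counts primes once with a sqrt-free while-loop trial division (d from 2 while d*d<=num, no parity shortcut and no math.sqrt), derives the majority group and surplus k from the count alone, and gets the answer in a single early-terminating pass over the whole sorted array, never building the two partition lists.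
import Mathlib
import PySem

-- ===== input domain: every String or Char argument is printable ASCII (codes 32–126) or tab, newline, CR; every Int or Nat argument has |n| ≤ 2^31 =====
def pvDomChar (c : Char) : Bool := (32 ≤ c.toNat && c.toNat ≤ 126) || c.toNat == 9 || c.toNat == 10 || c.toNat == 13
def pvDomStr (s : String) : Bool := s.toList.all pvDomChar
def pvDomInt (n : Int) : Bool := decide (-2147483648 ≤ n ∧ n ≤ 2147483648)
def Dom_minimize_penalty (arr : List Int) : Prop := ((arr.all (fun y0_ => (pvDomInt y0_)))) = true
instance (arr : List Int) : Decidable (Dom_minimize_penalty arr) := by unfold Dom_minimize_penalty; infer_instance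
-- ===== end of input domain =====

-- B counts primes once (with a sqrt-free while-loop trial division) and sums the k smallest
-- majority-class elements in one early-stopping scan of the sorted array, building no
-- partition lists; an alternative decomposition of the same cost (objective: alternative).

-- ===== PORT A =====
-- int(math.sqrt num) is ported as Nat.sqrt, exact for 0 ≤ num ≤ 2^31 (the stated domain),
-- where the correctly-rounded double sqrt never crosses an integer boundary.
def pyIsPrime (num : Int) : Bool :=
  if num ≤ 1 then false
  else if num = 2 then true
  else if PySem.Int.mod num 2 = 0 then false
  else if (PySem.List.pyRange 3 ((Nat.sqrt num.toNat : Int) + 1) 2).any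
            (fun i => PySem.Int.mod num i == 0) then false
  else true

def minimize_penalty (arr : List Int) : Int :=
  let st := arr.foldl (fun (st : List Int × List Int) num =>
      if pyIsPrime num then (st.1 ++ [num], st.2) else (st.1, st.2 ++ [num])) ([], [])
  let primes := st.1
  let non_primes := st.2
  if primes.length > non_primes.length then
    ((PySem.List.sorted primes (fun x => x) false).take (primes.length - non_primes.length)).sum
  else
    ((PySem.List.sorted non_primes (fun x => x) false).take (non_primes.length - primes.length)).sum

-- ===== PORT B =====
-- B's while loop 'd = 2; while d*d <= num: …; d += 1'
def altTrial (num d : Int) : Bool :=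
  if _h : d * d ≤ num then
    if PySem.Int.mod num d = 0 then false else altTrial num (d + 1)
  else true
termination_by (num + 1 - d).toNat
decreasing_by
  have h1 : 0 ≤ d * d := mul_self_nonneg d
  have h2 : 2 * d ≤ d * d + 1 := by nlinarith [mul_self_nonneg (d - 1)]
  omega

def altIsPrime (num : Int) : Bool :=
  if num < 2 then false else altTrial num 2

-- B's 'for x in sorted(arr): if k == 0: break; if is_prime(x) == want: total += x; k -= 1'
def altScan (want : Bool) : List Int → Nat → Int → Int
  | [], _, total => total
  | x :: xs, k, total =>
      if k = 0 then total
      else if altIsPrime x == want then altScan want xs (k - 1) (total + x)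
      else altScan want xs k total

def minimize_penalty_alt (arr : List Int) : Int :=
  let k0 : Int := 2 * (arr.countP (fun x => altIsPrime x) : Int) - arr.length
  let want : Bool := decide (0 < k0)
  altScan want (PySem.List.sorted arr (fun x => x) false) k0.natAbs 0

-- ===== PRECONDITION & SPEC =====
def Spec_minimize_penalty (arr : List Int) (out : Int) : Prop := out = minimize_penalty_alt arr
instance (arr : List Int) (out : Int) : Decidable (Spec_minimize_penalty arr out) := by unfold Spec_minimize_penalty; infer_instance

-- ===== CLAIM (what is proved, stated in full; the proofs are below) =====
def Claim_equal_minimize_penalty : Prop := ∀ (arr : List Int), Dom_minimize_penalty arr → Spec_minimize_penalty arr (minimize_penalty arr)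

-- ===== LEMMAS AND PROOFS =====

-- B's while loop returns true iff no candidate divisor from d on divides num.
theorem altTrial_eq_true_iff (num d : Int) (hd : 1 ≤ d) :
    altTrial num d = true ↔ ∀ e : Int, d ≤ e → e * e ≤ num → PySem.Int.mod num e ≠ 0 := by
  fun_induction altTrial num d with
  | case1 d h hmod =>
      simp only [Bool.false_eq_true, false_iff, not_forall]
      exact ⟨d, le_rfl, h, by simpa using hmod⟩
  | case2 d h hmod ih =>
      rw [ih (by omega)]
      constructor
      · intro hall e hde hee
        rcases eq_or_lt_of_le hde with rfl | hlt
        · exact hmod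
        · exact hall e (by omega) hee
      · intro hall e hde hee; exact hall e (by omega) hee
  | case3 d h =>
      simp only [true_iff]
      intro e hde hee heq
      nlinarith

-- the two primality tests agree on every integer
theorem isPrime_agree (num : Int) : pyIsPrime num = altIsPrime num := by
  unfold pyIsPrime altIsPrime
  by_cases h1 : num ≤ 1
  · simp [h1, show num < 2 by omega]
  · by_cases h2 : num = 2
    · subst h2
      rw [altTrial.eq_def]
      norm_num
    · have h3 : 3 ≤ num := by omega
      simp only [if_neg h1, if_neg h2, if_neg (show ¬ num < 2 by omega)]
      by_cases he : PySem.Int.mod num 2 = 0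
      · have hdvd : (2 : Int) ∣ num := (PySem.Int.mod_eq_zero_iff_dvd num 2).mp he
        have h4 : 4 ≤ num := by rcases hdvd with ⟨c, rfl⟩; omega
        have hfalse : altTrial num 2 = false := by
          rw [altTrial.eq_def, dif_pos (show (2:Int) * 2 ≤ num by omega), if_pos he]
        rw [if_pos he, hfalse]
      · rw [if_neg he]
        by_cases hany : (PySem.List.pyRange 3 ((Nat.sqrt num.toNat : Int) + 1) 2).any
            (fun i => PySem.Int.mod num i == 0) = true
        · -- a divisor was found in A's range: B's loop refutes primality too
          obtain ⟨i, hmem, hmod⟩ := by simpa only [List.any_eq_true, beq_iff_eq] using hany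
          rw [PySem.List.mem_pyRange_iff_of_pos (by norm_num)] at hmem
          obtain ⟨hi3, hilt, _⟩ := hmem
          have hii : i * i ≤ num := by
            have hs : i.toNat ≤ Nat.sqrt num.toNat := by omega
            have hss := Nat.le_sqrt.mp hs
            have hc : ((i.toNat * i.toNat : Nat) : Int) ≤ ((num.toNat : Nat) : Int) :=
              by exact_mod_cast hss
            push_cast at hc
            rw [show ((i.toNat : Int)) = i by omega] at hc
            omega
          have hAT : altTrial num 2 = false := by
            rw [← Bool.not_eq_true, altTrial_eq_true_iff num 2 (by norm_num)]
            push Not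
            exact ⟨i, by omega, hii, by simpa using hmod⟩
          rw [if_pos hany, hAT]
        · -- no divisor in A's range: no divisor at all (odd num excludes even divisors)
          have hall : ∀ e : Int, 2 ≤ e → e * e ≤ num → PySem.Int.mod num e ≠ 0 := by
            intro e hde hee heq
            have hdvdE : e ∣ num := (PySem.Int.mod_eq_zero_iff_dvd num e).mp heq
            have hodd : ¬ (2 : Int) ∣ e := fun h2e =>
              he ((PySem.Int.mod_eq_zero_iff_dvd num 2).mpr (h2e.trans hdvdE))
            have he3 : 3 ≤ e := by omega
            have hesqrt : e ≤ (Nat.sqrt num.toNat : Int) := by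
              have h1n : e.toNat * e.toNat ≤ num.toNat := by
                have hc : ((e.toNat * e.toNat : Nat) : Int) ≤ ((num.toNat : Nat) : Int) := by
                  push_cast
                  rw [show ((e.toNat : Int)) = e by omega, show ((num.toNat : Int)) = num by omega]
                  exact hee
                exact_mod_cast hc
              have := Nat.le_sqrt.mpr h1n
              omega
            have hmem : e ∈ PySem.List.pyRange 3 ((Nat.sqrt num.toNat : Int) + 1) 2 := by
              rw [PySem.List.mem_pyRange_iff_of_pos (by norm_num)]
              exact ⟨he3, by omega, by omega⟩
            exact hany (by simp only [List.any_eq_true, beq_iff_eq]; exact ⟨e, hmem, heq⟩)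
          have hAT : altTrial num 2 = true :=
            (altTrial_eq_true_iff num 2 (by norm_num)).mpr hall
          rw [if_neg hany, hAT]

-- A's partition loop computes the two filters.
theorem pv_foldl_partition (arr a b : List Int) :
    arr.foldl (fun (st : List Int × List Int) num =>
      if pyIsPrime num then (st.1 ++ [num], st.2) else (st.1, st.2 ++ [num])) (a, b)
    = (a ++ arr.filter (fun x => pyIsPrime x), b ++ arr.filter (fun x => !pyIsPrime x)) := by
  induction arr generalizing a b with
  | nil => simp
  | cons x xs ih =>
      by_cases h : pyIsPrime x <;> simp [List.foldl_cons, h, ih]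

-- filtering a sorted list = sorting the filtered list
theorem pv_filter_sorted (p : Int → Bool) (arr : List Int) :
    (PySem.List.sorted arr (fun x => x) false).filter p
    = PySem.List.sorted (arr.filter p) (fun x => x) false := by
  refine (PySem.List.sorted_id_eq_of_perm_of_pairwise _ _ ?_ ?_).symm
  · exact (PySem.List.sorted_perm arr (fun x => x) false).filter p
  · exact (PySem.List.sorted_pairwise arr (fun x => x)).filter p

-- B's scan loop sums the first k list elements matching the wanted class.
theorem altScan_eq (want : Bool) (l : List Int) (k : Nat) (t : Int) :
    altScan want l k t = t + (((l.filter (fun x => altIsPrime x == want)).take k).sum) := by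
  induction l generalizing k t with
  | nil => simp [altScan]
  | cons x xs ih =>
      by_cases hk : k = 0
      · subst hk; simp [altScan]
      · by_cases hp : altIsPrime x == want
        · have hk' : ∃ m, k = m + 1 := ⟨k - 1, by omega⟩
          obtain ⟨m, rfl⟩ := hk'
          simp [altScan, hp, ih]
          ring
        · simp [altScan, hk, hp, ih]

-- ===== VERDICT (by name: the statement is the Claim_ definition above) =====
theorem minimize_penalty_spec : Claim_equal_minimize_penalty := by
  intro arr _
  unfold Spec_minimize_penalty minimize_penalty minimize_penalty_alt
  simp only [pv_foldl_partition, List.nil_append, altScan_eq, zero_add]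
  have hfe : ∀ x : Int, pyIsPrime x = altIsPrime x := isPrime_agree
  have hcount : arr.countP (fun x => altIsPrime x) = (arr.filter (fun x => pyIsPrime x)).length := by
    simp only [List.countP_eq_length_filter]
    congr 1
    exact List.filter_congr (fun x _ => (hfe x).symm)
  have hlen : arr.length = (arr.filter (fun x => pyIsPrime x)).length
      + (arr.filter (fun x => !pyIsPrime x)).length :=
    List.length_eq_length_filter_add _
  set F := arr.filter (fun x => pyIsPrime x) with hF
  set G := arr.filter (fun x => !pyIsPrime x) with hG
  have hfiltT : (PySem.List.sorted arr (fun x => x) false).filter (fun x => altIsPrime x == true)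
      = PySem.List.sorted F (fun x => x) false := by
    rw [show (fun x : Int => altIsPrime x == true) = (fun x : Int => pyIsPrime x) from
      funext (fun x => by rw [← hfe x]; cases pyIsPrime x <;> rfl)]
    exact pv_filter_sorted _ arr
  have hfiltF : (PySem.List.sorted arr (fun x => x) false).filter (fun x => altIsPrime x == false)
      = PySem.List.sorted G (fun x => x) false := by
    rw [show (fun x : Int => altIsPrime x == false) = (fun x : Int => !pyIsPrime x) from
      funext (fun x => by rw [← hfe x]; cases pyIsPrime x <;> rfl)]
    exact pv_filter_sorted _ arr
  by_cases h : G.length < F.length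
  · have hw : decide ((0:Int) < 2 * ((arr.countP (fun x => altIsPrime x) : Nat) : Int)
        - arr.length) = true := by
      rw [decide_eq_true_eq, hcount]; omega
    have hk : (((2 * ((arr.countP (fun x => altIsPrime x) : Nat) : Int) - arr.length)).natAbs
        : Nat) = F.length - G.length := by
      rw [hcount]; omega
    rw [if_pos (show F.length > G.length from h), hw, hk, hfiltT]
  · have hw : decide ((0:Int) < 2 * ((arr.countP (fun x => altIsPrime x) : Nat) : Int)
        - arr.length) = false := by
      rw [decide_eq_false_iff_not, hcount]; omega
    have hk : (((2 * ((arr.countP (fun x => altIsPrime x) : Nat) : Int) - arr.length)).natAbs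
        : Nat) = G.length - F.length := by
      rw [hcount]; omega
    rw [if_neg (show ¬ F.length > G.length from h), hw, hk, hfiltF]
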